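-- pv_equiv track=rewrite | github.com/shalom2552/IntroToDataScience | HW1/part1/data.py | filter_by_feature
-- ===== SOURCE A (Python) =====
-- def filter_by_feature(data, feature, values):
-- 	"""
-- 	@param data: dictionary keys from data set and values of them
-- 	@param feature: name of categorical programs
-- 	@param values: set of values so that features can get all the values in 'values'
-- 	this func read the relevant features and loaded it to the main memory
-- 	@return data1,data2: returns tow dictionaries so that their union will make the all data
-- 	and data1 will have all rows so that features got some equal value in values, and so for data2
-- 	"""
-- 	dict1={}
-- 	dict2={}
-- 	length = len(data[feature])
-- 	for key in data:
-- 		dict1[key] =[]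
-- 		dict2[key]=[]
-- 	for n in range(length):
-- 		if data[feature][n] in values:
-- 			for key in data:
-- 				dict1[key].append(data[key][n])
-- 		else:
-- 			for key in data:
-- 				dict2[key].append(data[key][n])
-- 	return dict1, dict2
-- ===== SOURCE B (Python) =====
-- def filter_by_feature(data, feature, values):
--     col = data[feature]
--     idx1 = [n for n in range(len(col)) if col[n] in values]
--     idx2 = [n for n in range(len(col)) if col[n] not in values]
--     dict1 = {key: [data[key][n] for n in idx1] for key in data}
--     dict2 = {key: [data[key][n] for n in idx2] for key in data}
--     return dict1, dict2
-- ===== Notes on version B (the rewrite author's own statement) =====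
-- stated objective: alternative
-- what changed: A makes one row-major pass appending every column's entry row by row; B first materializes the row-index partition (idx1/idx2) from the feature column, then builds each output dict column-major by per-key comprehensions over those index lists.
import Mathlib
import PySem

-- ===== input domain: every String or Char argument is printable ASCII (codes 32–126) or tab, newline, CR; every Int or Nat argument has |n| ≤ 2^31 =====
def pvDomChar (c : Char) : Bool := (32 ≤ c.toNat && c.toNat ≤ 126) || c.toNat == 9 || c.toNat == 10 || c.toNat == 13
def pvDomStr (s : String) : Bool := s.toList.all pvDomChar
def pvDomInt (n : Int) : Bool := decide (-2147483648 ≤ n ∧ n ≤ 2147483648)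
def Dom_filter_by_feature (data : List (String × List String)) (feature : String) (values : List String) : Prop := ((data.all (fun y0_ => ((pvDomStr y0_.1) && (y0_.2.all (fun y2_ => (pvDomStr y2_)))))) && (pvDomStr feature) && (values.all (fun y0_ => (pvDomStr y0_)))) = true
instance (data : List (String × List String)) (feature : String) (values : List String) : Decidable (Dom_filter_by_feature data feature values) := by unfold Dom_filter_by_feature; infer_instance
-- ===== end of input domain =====

-- B replaces A's single row-major pass (append every column per row) by first materializing the
-- row-index partition from the feature column and then building both dicts column-major; same cost.

-- ===== PORT A =====
def filter_by_feature (data : List (String × List String)) (feature : String) (values : List String) : (List (String × List String)) × (List (String × List String)) :=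
  let dd : PySem.Dict String (List String) := PySem.Dict.mk data
  -- dict1 = {}; dict2 = {}; for key in data: dict1[key] = []; dict2[key] = []
  let init : PySem.Dict String (List String) × PySem.Dict String (List String) :=
    data.foldl (fun p kv => (p.1.insert kv.1 [], p.2.insert kv.1 [])) (PySem.Dict.mk [], PySem.Dict.mk [])
  -- length = len(data[feature])  (KeyError excluded by Pre_)
  let length : Nat := (dd.getD feature []).length
  -- for n in range(length): if data[feature][n] in values: append row n to dict1 else to dict2
  -- (data[key][n] out of range raises IndexError in Python; excluded by Pre_)
  let final := (PySem.List.pyRange 0 (length : Int) 1).foldl (fun p n =>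
    if values.contains ((PySem.List.pyGet? (dd.getD feature []) n).getD "") then
      (data.foldl (fun d kv => d.modify kv.1 [] (fun l => l ++ [(PySem.List.pyGet? (dd.getD kv.1 []) n).getD ""])) p.1, p.2)
    else
      (p.1, data.foldl (fun d kv => d.modify kv.1 [] (fun l => l ++ [(PySem.List.pyGet? (dd.getD kv.1 []) n).getD ""])) p.2)) init
  (final.1.items, final.2.items)

-- ===== PORT B =====
def filter_by_feature_alt (data : List (String × List String)) (feature : String) (values : List String) : (List (String × List String)) × (List (String × List String)) :=
  let dd : PySem.Dict String (List String) := PySem.Dict.mk data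
  let col := dd.getD feature []
  let idx1 := (PySem.List.pyRange 0 (col.length : Int) 1).filter
    (fun n => values.contains ((PySem.List.pyGet? col n).getD ""))
  let idx2 := (PySem.List.pyRange 0 (col.length : Int) 1).filter
    (fun n => !values.contains ((PySem.List.pyGet? col n).getD ""))
  let dict1 := data.foldl (fun d kv =>
    d.insert kv.1 (idx1.map (fun n => (PySem.List.pyGet? (dd.getD kv.1 []) n).getD ""))) (PySem.Dict.mk [])
  let dict2 := data.foldl (fun d kv =>
    d.insert kv.1 (idx2.map (fun n => (PySem.List.pyGet? (dd.getD kv.1 []) n).getD ""))) (PySem.Dict.mk [])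
  (dict1.items, dict2.items)

-- ===== PRECONDITION & SPEC =====
-- Pre_ excludes inputs where the Python raises (feature not a key: KeyError; a column shorter than
-- the feature column: IndexError) and association lists with duplicate keys, which a Python dict
-- cannot represent (such lists do not encode any Python dict input).
def Pre_filter_by_feature (data : List (String × List String)) (feature : String) (values : List String) : Prop :=
  (data.map Prod.fst).Nodup ∧ feature ∈ data.map Prod.fst ∧
  ∀ kv ∈ data, ((PySem.Dict.mk data).getD feature []).length ≤ kv.2.length
instance (data : List (String × List String)) (feature : String) (values : List String) : Decidable (Pre_filter_by_feature data feature values) := by unfold Pre_filter_by_feature; infer_instance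

def pvWitness_filter_by_feature : (List (String × List String)) × String × List String :=
  ([("f", ["a", "b"]), ("x", ["1", "2"])], "f", ["a"])

def Spec_filter_by_feature (data : List (String × List String)) (feature : String) (values : List String) (out : (List (String × List String)) × (List (String × List String))) : Prop := out = filter_by_feature_alt data feature values
instance (data : List (String × List String)) (feature : String) (values : List String) (out : (List (String × List String)) × (List (String × List String))) : Decidable (Spec_filter_by_feature data feature values out) := by unfold Spec_filter_by_feature; infer_instance

-- ===== CLAIM (what is proved, stated in full; the proofs are below) =====
def Claim_equal_filter_by_feature : Prop := ∀ (data : List (String × List String)) (feature : String) (values : List String), Dom_filter_by_feature data feature values → Pre_filter_by_feature data feature values → Spec_filter_by_feature data feature values (filter_by_feature data feature values)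

-- ===== LEMMAS AND PROOFS =====

-- replacing key k in a list that does not carry k is the identity
lemma map_replace_id {ν : Type} (l : List (String × ν)) (k : String) (v : ν)
    (h : ∀ p ∈ l, p.1 ≠ k) :
    l.map (fun p => if p.1 == k then (k, v) else p) = l := by
  induction l with
  | nil => rfl
  | cons p t ih =>
    have h1 : p.1 ≠ k := h p (by simp)
    simp only [List.map_cons, ih (fun q hq => h q (List.mem_cons_of_mem _ hq))]
    simp [h1]

-- first-match lookup in a literal dict whose prefix does not carry k
lemma getD_mk_append_cons {ν : Type} (pre rest : List (String × ν)) (k : String) (v d0 : ν)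
    (h : ∀ p ∈ pre, p.1 ≠ k) :
    (PySem.Dict.mk (pre ++ (k, v) :: rest)).getD k d0 = v := by
  induction pre with
  | nil => simp [PySem.Dict.getD_eq_get?_getD, PySem.Dict.get?_mk_cons]
  | cons p t ih =>
    have h1 : p.1 ≠ k := h p (by simp)
    rw [List.cons_append, PySem.Dict.getD_eq_get?_getD, PySem.Dict.get?_mk_cons,
      if_neg (by simpa using h1), ← PySem.Dict.getD_eq_get?_getD]
    exact ih (fun q hq => h q (List.mem_cons_of_mem _ hq))

lemma contains_mk_append_cons {ν : Type} (pre rest : List (String × ν)) (k : String) (v : ν) :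
    (PySem.Dict.mk (pre ++ (k, v) :: rest)).contains k = true := by
  simp [PySem.Dict.contains_mk]

-- the inner "for key in data: dictX[key].append(v key)" loop, over a dict carrying exactly the
-- processed prefix followed by the unprocessed suffix of data's keys
lemma foldl_modify_all (v : String → String) :
    ∀ (rest pre : List (String × List String)) (f : String → List String),
      (pre.map Prod.fst ++ rest.map Prod.fst).Nodup →
      rest.foldl (fun d kv => d.modify kv.1 [] (fun l => l ++ [v kv.1]))
          (PySem.Dict.mk (pre ++ rest.map (fun kv => (kv.1, f kv.1))))
        = PySem.Dict.mk (pre ++ rest.map (fun kv => (kv.1, f kv.1 ++ [v kv.1]))) := by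
  intro rest
  induction rest with
  | nil => intro pre f _; simp
  | cons kv t ih =>
    intro pre f hnd
    have hpre : ∀ p ∈ pre, p.1 ≠ kv.1 := by
      intro p hp he
      have hd := (List.nodup_append.mp hnd).2.2
      exact hd p.1 (List.mem_map_of_mem hp) kv.1 (by simp) he
    have ht : ∀ p ∈ t.map (fun kv => ((kv.1 : String), f kv.1)), p.1 ≠ kv.1 := by
      intro p hp he
      obtain ⟨q, hq, rfl⟩ := List.mem_map.mp hp
      have h2 := (List.nodup_append.mp hnd).2.1
      rw [List.map_cons, List.nodup_cons] at h2
      have hq1 : q.1 ∈ t.map Prod.fst := List.mem_map_of_mem hq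
      exact h2.1 (he ▸ hq1)
    simp only [List.map_cons, List.foldl_cons]
    have hmod : (PySem.Dict.mk (pre ++ (kv.1, f kv.1) :: t.map (fun kv => (kv.1, f kv.1)))).modify
        kv.1 [] (fun l => l ++ [v kv.1])
        = PySem.Dict.mk ((pre ++ [(kv.1, f kv.1 ++ [v kv.1])]) ++ t.map (fun kv => (kv.1, f kv.1))) := by
      rw [PySem.Dict.modify, getD_mk_append_cons _ _ _ _ _ hpre, PySem.Dict.insert,
        if_pos (contains_mk_append_cons ..)]
      simp only [List.map_append, List.map_cons, map_replace_id _ _ _ hpre,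
        map_replace_id _ _ _ ht, beq_self_eq_true, if_pos]
      simp
    rw [hmod, ih (pre ++ [(kv.1, f kv.1 ++ [v kv.1])]) f (by simpa using hnd)]
    simp

lemma foldl_modify_all0 (v : String → String) (data : List (String × List String))
    (f : String → List String) (hnd : (data.map Prod.fst).Nodup) :
    data.foldl (fun d kv => d.modify kv.1 [] (fun l => l ++ [v kv.1]))
        (PySem.Dict.mk (data.map (fun kv => (kv.1, f kv.1))))
      = PySem.Dict.mk (data.map (fun kv => (kv.1, f kv.1 ++ [v kv.1]))) := by
  simpa using foldl_modify_all v data [] f (by simpa using hnd)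

-- the whole row loop: after processing the rows of ns, dict1/dict2 carry per key the previously
-- accumulated list extended by the selected / rejected rows of ns, in order
lemma loop_inv (data : List (String × List String)) (hnd : (data.map Prod.fst).Nodup)
    (cond : Int → Bool) (v : String → Int → String) :
    ∀ (ns : List Int) (f g : String → List String),
      ns.foldl (fun p n =>
          if cond n then
            (data.foldl (fun d kv => d.modify kv.1 [] (fun l => l ++ [v kv.1 n])) p.1, p.2)
          else
            (p.1, data.foldl (fun d kv => d.modify kv.1 [] (fun l => l ++ [v kv.1 n])) p.2))
        (PySem.Dict.mk (data.map (fun kv => (kv.1, f kv.1))),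
         PySem.Dict.mk (data.map (fun kv => (kv.1, g kv.1))))
      = (PySem.Dict.mk (data.map (fun kv => (kv.1, f kv.1 ++ (ns.filter cond).map (v kv.1)))),
         PySem.Dict.mk (data.map (fun kv => (kv.1, g kv.1 ++ (ns.filter (fun n => !cond n)).map (v kv.1))))) := by
  intro ns
  induction ns with
  | nil => intro f g; simp
  | cons n t ih =>
    intro f g
    simp only [List.foldl_cons]
    by_cases hc : cond n
    · rw [if_pos hc, foldl_modify_all0 (fun k => v k n) data f hnd,
        ih (fun k => f k ++ [v k n]) g]
      simp [hc]
    · rw [if_neg hc, foldl_modify_all0 (fun k => v k n) data g hnd,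
        ih f (fun k => g k ++ [v k n])]
      simp [hc]

-- the key-initialisation loop builds the dict with data's keys and the given per-key value
lemma foldl_insert_eq_mk (data : List (String × List String)) (hnd : (data.map Prod.fst).Nodup)
    (w : String → List String) :
    data.foldl (fun d kv => d.insert kv.1 (w kv.1)) (PySem.Dict.mk [])
      = PySem.Dict.mk (data.map (fun kv => (kv.1, w kv.1))) := by
  apply PySem.Dict.ext
  rw [PySem.Dict.items_foldl_insert_fresh data (fun kv => kv.1) (fun kv => w kv.1)
    (PySem.Dict.mk []) (fun a _ => by simp [PySem.Dict.contains_mk]) hnd]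
  simp

lemma foldl_insert_pair (data : List (String × List String))
    (d1 d2 : PySem.Dict String (List String)) :
    data.foldl (fun p kv => (p.1.insert kv.1 ([] : List String), p.2.insert kv.1 [])) (d1, d2)
      = (data.foldl (fun d kv => d.insert kv.1 []) d1, data.foldl (fun d kv => d.insert kv.1 []) d2) := by
  induction data generalizing d1 d2 with
  | nil => rfl
  | cons kv t ih => simp [ih]

-- ===== VERDICT (by name: the statement is the Claim_ definition above) =====
theorem filter_by_feature_spec : Claim_equal_filter_by_feature := by
  intro data feature values _ hpre
  obtain ⟨hnd, -, -⟩ := hpre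
  show filter_by_feature data feature values = filter_by_feature_alt data feature values
  simp only [filter_by_feature, filter_by_feature_alt]
  rw [foldl_insert_pair, foldl_insert_eq_mk data hnd (fun _ => ([] : List String)),
    loop_inv data hnd
      (fun n => values.contains ((PySem.List.pyGet? ((PySem.Dict.mk data).getD feature []) n).getD ""))
      (fun k n => (PySem.List.pyGet? ((PySem.Dict.mk data).getD k []) n).getD "")
      (PySem.List.pyRange 0 (((PySem.Dict.mk data).getD feature []).length : Int) 1)
      (fun _ => []) (fun _ => []),
    foldl_insert_eq_mk data hnd (fun k =>
      ((PySem.List.pyRange 0 (((PySem.Dict.mk data).getD feature []).length : Int) 1).filter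
        (fun n => values.contains ((PySem.List.pyGet? ((PySem.Dict.mk data).getD feature []) n).getD ""))).map
        (fun n => (PySem.List.pyGet? ((PySem.Dict.mk data).getD k []) n).getD "")),
    foldl_insert_eq_mk data hnd (fun k =>
      ((PySem.List.pyRange 0 (((PySem.Dict.mk data).getD feature []).length : Int) 1).filter
        (fun n => !values.contains ((PySem.List.pyGet? ((PySem.Dict.mk data).getD feature []) n).getD ""))).map
        (fun n => (PySem.List.pyGet? ((PySem.Dict.mk data).getD k []) n).getD ""))]
  simp
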